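-- pv_equiv track=rewrite | github.com/Aicha-code/AI_Group1_Implementation_Assignment3 | expert_system.py | diagnose_disease
-- ===== SOURCE A (Python) =====
-- diseases = {
--     "Powdery Mildew": {
--         "symptoms": ["white powdery spots", "yellowing of leaves", "leaf curling"]
--     },
--     "Leaf Rust": {
--         "symptoms": ["orange or yellow spots", "rust-colored lesions", "deformed leaves"]
--     },
--     "Blight": {
--         "symptoms": ["dark lesions", "wilting", "yellowing around the edges"]
--     },
--     "Healthy": {
--         "symptoms": ["no symptoms", "healthy green leaves"]
--     }
-- }
--
-- def diagnose_disease(symptoms):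
--     matches = []
--     for disease, details in diseases.items():
--         common_symptoms = set(symptoms).intersection(set(details["symptoms"]))
--         if common_symptoms:
--             matches.append((disease, len(common_symptoms)))
--
--     # Sort matches by number of common symptoms
--     matches.sort(key=lambda x: x[1], reverse=True)
--
--     if matches:
--         best_match = matches[0]
--         return best_match[0]  # Disease name
--     else:
--         return "Unknown Disease"
-- ===== SOURCE B (Python) =====
-- diseases = {
--     "Powdery Mildew": {
--         "symptoms": ["white powdery spots", "yellowing of leaves", "leaf curling"]
--     },
--     "Leaf Rust": {
--         "symptoms": ["orange or yellow spots", "rust-colored lesions", "deformed leaves"]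
--     },
--     "Blight": {
--         "symptoms": ["dark lesions", "wilting", "yellowing around the edges"]
--     },
--     "Healthy": {
--         "symptoms": ["no symptoms", "healthy green leaves"]
--     }
-- }
--
-- def diagnose_disease(symptoms):
--     best_name = None
--     best_count = 0
--     for disease, details in diseases.items():
--         count = len(set(symptoms) & set(details["symptoms"]))
--         if count > best_count:
--             best_name, best_count = disease, count
--     return best_name if best_name is not None else "Unknown Disease"
-- ===== Notes on version B (the rewrite author's own statement) =====
-- stated objective: simpler
-- what changed: Replaces the build-a-matches-list, stable-reverse-sort, take-head pipeline with a single pass over the disease dict keeping only the best name and count (strict > preserves A's first-in-dict-order tie-break).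
import Mathlib
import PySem

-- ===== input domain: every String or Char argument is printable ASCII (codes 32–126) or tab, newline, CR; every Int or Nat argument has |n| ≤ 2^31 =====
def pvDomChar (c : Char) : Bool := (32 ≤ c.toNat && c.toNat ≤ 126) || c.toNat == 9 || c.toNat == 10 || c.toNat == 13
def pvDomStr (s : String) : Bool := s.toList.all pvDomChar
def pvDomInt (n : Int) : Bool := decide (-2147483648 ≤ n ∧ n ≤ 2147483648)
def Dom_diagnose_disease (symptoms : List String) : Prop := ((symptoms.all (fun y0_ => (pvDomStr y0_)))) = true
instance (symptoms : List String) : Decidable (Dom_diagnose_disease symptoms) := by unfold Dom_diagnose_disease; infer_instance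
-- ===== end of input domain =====

-- B replaces A's matches-list + stable reverse sort + head with a single best-so-far pass (simpler; same result).

-- the module-level 'diseases' dict: association list in insertion order (values are the symptom lists)
def diseasesList : List (String × List String) :=
  [("Powdery Mildew", ["white powdery spots", "yellowing of leaves", "leaf curling"]),
   ("Leaf Rust", ["orange or yellow spots", "rust-colored lesions", "deformed leaves"]),
   ("Blight", ["dark lesions", "wilting", "yellowing around the edges"]),
   ("Healthy", ["no symptoms", "healthy green leaves"])]

-- len(set(symptoms) & set(ds)) — both Pythons compute exactly this intersection size
def interLen (symptoms ds : List String) : Nat :=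
  List.length (PySem.Set.inter (PySem.Set.ofList symptoms) (PySem.Set.ofList ds))

-- ===== PORT A =====
def diagnose_disease (symptoms : List String) : String :=
  let matchList := diseasesList.foldl
    (fun acc dd =>
      let c := interLen symptoms dd.2          -- common_symptoms as its size
      if c ≠ 0 then acc ++ [(dd.1, c)] else acc)  -- 'if common_symptoms:' = nonempty set
    []
  match PySem.List.sorted matchList (fun x => x.2) true with  -- matches.sort(key=…, reverse=True)
  | best :: _ => best.1
  | [] => "Unknown Disease"

-- ===== PORT B =====
def diagnose_disease_alt (symptoms : List String) : String :=
  let best := diseasesList.foldl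
    (fun (best : Option String × Nat) dd =>
      let c := interLen symptoms dd.2
      if best.2 < c then (some dd.1, c) else best)
    (none, 0)
  match best.1 with
  | some name => name
  | none => "Unknown Disease"

-- ===== PRECONDITION & SPEC =====
def Spec_diagnose_disease (symptoms : List String) (out : String) : Prop := out = diagnose_disease_alt symptoms
instance (symptoms : List String) (out : String) : Decidable (Spec_diagnose_disease symptoms out) := by unfold Spec_diagnose_disease; infer_instance

-- ===== CLAIM (what is proved, stated in full; the proofs are below) =====
def Claim_equal_diagnose_disease : Prop := ∀ (symptoms : List String), Dom_diagnose_disease symptoms → Spec_diagnose_disease symptoms (diagnose_disease symptoms)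

-- ===== LEMMAS AND PROOFS =====

lemma interLen_le (symptoms ds : List String) : interLen symptoms ds ≤ ds.length := by
  have hnd : (PySem.Set.inter (PySem.Set.ofList symptoms) (PySem.Set.ofList ds)).Nodup := by
    exact (PySem.Set.nodup_ofList symptoms).filter _
  have hsub : (PySem.Set.inter (PySem.Set.ofList symptoms) (PySem.Set.ofList ds)) ⊆ ds := by
    intro x hx
    have := List.of_mem_filter hx
    simpa [PySem.Set.contains, PySem.Set.mem_ofList] using
      (PySem.Set.mem_ofList ds x).mp (by simpa [PySem.Set.contains] using this)
  simpa [interLen] using (hnd.subperm hsub).length_le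

lemma ab_eq (symptoms : List String) : diagnose_disease symptoms = diagnose_disease_alt symptoms := by
  have h1 := interLen_le symptoms ["white powdery spots", "yellowing of leaves", "leaf curling"]
  have h2 := interLen_le symptoms ["orange or yellow spots", "rust-colored lesions", "deformed leaves"]
  have h3 := interLen_le symptoms ["dark lesions", "wilting", "yellowing around the edges"]
  have h4 := interLen_le symptoms ["no symptoms", "healthy green leaves"]
  simp only [List.length_cons, List.length_nil] at h1 h2 h3 h4
  unfold diagnose_disease diagnose_disease_alt
  simp only [diseasesList, List.foldl]
  generalize interLen symptoms ["white powdery spots", "yellowing of leaves", "leaf curling"] = c1 at h1 ⊢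
  generalize interLen symptoms ["orange or yellow spots", "rust-colored lesions", "deformed leaves"] = c2 at h2 ⊢
  generalize interLen symptoms ["dark lesions", "wilting", "yellowing around the edges"] = c3 at h3 ⊢
  generalize interLen symptoms ["no symptoms", "healthy green leaves"] = c4 at h4 ⊢
  interval_cases c1 <;> interval_cases c2 <;> interval_cases c3 <;> interval_cases c4 <;> rfl

-- ===== VERDICT (by name: the statement is the Claim_ definition above) =====
theorem diagnose_disease_spec : Claim_equal_diagnose_disease := by
  intro symptoms _
  exact ab_eq symptoms
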